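-- pv_equiv track=rewrite | github.com/dynamic-kgqa/dynamicKGQA | src/kg/subgraph_functions.py | get_full_uri
-- ===== SOURCE A (Python) =====
-- def encode_to_underscored_unicode(s: str) -> str:
--     """
--     Encodes a string so that:
--       1. Every space ' ' becomes an underscore '_'.
--       2. Every non-alphanumeric, non-underscore character c becomes `_uXXXX_`
--          where XXXX is the 4-digit uppercase hex code of that character.
--       3. Alphanumeric characters (letters/digits) and underscores remain as is.
--     """
--     result = []
--     for c in s:
--         if c == ' ':
--             # Convert spaces to underscores
--             result.append('_')
--         elif c.isalnum() or c == '_':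
--             # Keep letters, digits, and underscores as is
--             result.append(c)
--         else:
--             # Convert everything else to _uXXXX_
--             result.append(f"_u{ord(c):04X}_")
--     return "".join(result)
--
-- def get_full_uri(pruned_node, triples):
--     """
--     Finds the full URI of a node given its pruned form and a list of triples.
--     If a direct match is not found, it tries one more time after
--     encoding the node name using `encode_to_underscored_unicode`.
--
--     Args:
--         pruned_node (str): The pruned node name (last part of the URI).
--         triples (list): A list of triples, where each triple is a list of
--             the form [subject, predicate, object].
--
--     Returns:
--         str: The full URI of the node if found, otherwise None.
--     """
--     # First pass: try matching the pruned_node exactly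
--     for triple in triples:
--         for element in triple:
--             if element.endswith('/' + pruned_node):
--                 return element
--
--     # If not found, transform the node name and try again
--     transformed_node = encode_to_underscored_unicode(pruned_node)
--     if transformed_node != pruned_node:
--         for triple in triples:
--             for element in triple:
--                 if element.endswith('/' + transformed_node):
--                     return element
--
--     # If still not found, give up
--     return None
-- ===== SOURCE B (Python) =====
-- def encode_to_underscored_unicode(s: str) -> str:
--     """
--     Encodes a string so that:
--       1. Every space ' ' becomes an underscore '_'.
--       2. Every non-alphanumeric, non-underscore character c becomes `_uXXXX_`
--          where XXXX is the 4-digit uppercase hex code of that character.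
--       3. Alphanumeric characters (letters/digits) and underscores remain as is.
--     """
--     result = []
--     for c in s:
--         if c == ' ':
--             result.append('_')
--         elif c.isalnum() or c == '_':
--             result.append(c)
--         else:
--             result.append(f"_u{ord(c):04X}_")
--     return "".join(result)
--
-- def get_full_uri(pruned_node, triples):
--     """Single scan: return the first exact suffix match immediately; remember the
--     first transformed-suffix match and fall back to it after the scan."""
--     exact_suffix = '/' + pruned_node
--     transformed = encode_to_underscored_unicode(pruned_node)
--     use_transformed = transformed != pruned_node
--     transformed_suffix = '/' + transformed
--     candidate = None
--     for triple in triples: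
--         for element in triple:
--             if element.endswith(exact_suffix):
--                 return element
--             if use_transformed and candidate is None and element.endswith(transformed_suffix):
--                 candidate = element
--     return candidate
-- ===== Notes on version B (the rewrite author's own statement) =====
-- stated objective: faster
-- what changed: Replaces A's two full passes over the triples by a single merged scan that returns the first exact suffix match immediately and remembers the first transformed-suffix match as a fallback; the suffix strings are built once before the loop instead of A's per-element '/'+node concatenation.
import Mathlib
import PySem

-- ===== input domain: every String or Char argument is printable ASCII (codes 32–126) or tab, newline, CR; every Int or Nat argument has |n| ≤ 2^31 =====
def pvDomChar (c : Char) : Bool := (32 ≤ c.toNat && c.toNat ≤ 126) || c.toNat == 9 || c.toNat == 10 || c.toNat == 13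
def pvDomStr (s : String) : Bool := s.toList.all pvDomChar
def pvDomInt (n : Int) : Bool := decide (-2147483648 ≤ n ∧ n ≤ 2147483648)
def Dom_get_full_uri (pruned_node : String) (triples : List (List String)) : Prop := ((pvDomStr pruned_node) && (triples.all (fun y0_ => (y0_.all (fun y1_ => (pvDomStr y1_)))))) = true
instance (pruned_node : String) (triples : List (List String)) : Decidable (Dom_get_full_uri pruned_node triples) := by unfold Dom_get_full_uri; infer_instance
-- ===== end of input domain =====

-- B does one merged scan (exact match returns at once; first transformed match is
-- remembered as a fallback) instead of A's two full passes; objective: simpler one-pass decomposition.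

-- ===== PORT A =====
-- uppercase hex digit (exact for 0 ≤ n < 16)
def pvHexDigit (n : Nat) : Char := if n < 10 then Char.ofNat (48 + n) else Char.ofNat (55 + n)
-- f"{n:04X}": exact for n < 65536, which covers every Dom character code
def pvHex4 (n : Nat) : List Char :=
  [pvHexDigit (n / 4096 % 16), pvHexDigit (n / 256 % 16), pvHexDigit (n / 16 % 16), pvHexDigit (n % 16)]

-- shared same-module helper encode_to_underscored_unicode (used verbatim by both A and B)
def encode_to_underscored_unicode (s : String) : String :=
  String.ofList (s.toList.foldl (fun result c =>
    if c = ' ' then result ++ ['_']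
    else if PySem.Chars.isalnum c || c = '_' then result ++ [c]
    else result ++ ('_' :: 'u' :: pvHex4 c.toNat ++ ['_'])) [])

-- A's inner 'for element in triple'
def pvPassRow (suf : String) : List String → Option String
  | [] => none
  | e :: es => if PySem.Str.endswith e suf then some e else pvPassRow suf es

-- A's 'for triple in triples'
def pvPass (suf : String) : List (List String) → Option String
  | [] => none
  | row :: rest =>
    match pvPassRow suf row with
    | some e => some e
    | none => pvPass suf rest

def get_full_uri (pruned_node : String) (triples : List (List String)) : Option String :=
  match pvPass ("/" ++ pruned_node) triples with
  | some e => some e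
  | none =>
    let transformed_node := encode_to_underscored_unicode pruned_node
    if transformed_node ≠ pruned_node then
      pvPass ("/" ++ transformed_node) triples
    else none

-- ===== PORT B =====
-- B's inner loop: Sum.inl e = early return on exact match, Sum.inr cand = updated candidate
def pvScanRow (sufE sufT : String) (flag : Bool) : List String → Option String → String ⊕ Option String
  | [], cand => Sum.inr cand
  | e :: es, cand =>
    if PySem.Str.endswith e sufE then Sum.inl e
    else pvScanRow sufE sufT flag es
      (if flag && cand.isNone && PySem.Str.endswith e sufT then some e else cand)

-- B's outer loop over triples
def pvScan (sufE sufT : String) (flag : Bool) : List (List String) → Option String → Option String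
  | [], cand => cand
  | row :: rest, cand =>
    match pvScanRow sufE sufT flag row cand with
    | Sum.inl e => some e
    | Sum.inr cand' => pvScan sufE sufT flag rest cand'

def get_full_uri_alt (pruned_node : String) (triples : List (List String)) : Option String :=
  let transformed := encode_to_underscored_unicode pruned_node
  let use_transformed := transformed != pruned_node
  pvScan ("/" ++ pruned_node) ("/" ++ transformed) use_transformed triples none

-- ===== PRECONDITION & SPEC =====
def Spec_get_full_uri (pruned_node : String) (triples : List (List String)) (out : Option String) : Prop := out = get_full_uri_alt pruned_node triples
instance (pruned_node : String) (triples : List (List String)) (out : Option String) : Decidable (Spec_get_full_uri pruned_node triples out) := by unfold Spec_get_full_uri; infer_instance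

-- ===== CLAIM (what is proved, stated in full; the proofs are below) =====
def Claim_equal_get_full_uri : Prop := ∀ (pruned_node : String) (triples : List (List String)), Dom_get_full_uri pruned_node triples → Spec_get_full_uri pruned_node triples (get_full_uri pruned_node triples)

-- ===== LEMMAS AND PROOFS =====
theorem pvScanRow_eq (sufE sufT : String) (flag : Bool) :
    ∀ (row : List String) (cand : Option String),
      pvScanRow sufE sufT flag row cand =
        match pvPassRow sufE row with
        | some e => Sum.inl e
        | none =>
          Sum.inr (match cand with
            | some c => some c
            | none => if flag then pvPassRow sufT row else none) := by
  intro row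
  induction row with
  | nil => intro cand; cases cand <;> cases flag <;> simp [pvScanRow, pvPassRow]
  | cons e es ih =>
    intro cand
    by_cases hE : PySem.Chars.endswith e.toList sufE.toList = true
    · simp [pvScanRow, pvPassRow, hE]
    · cases cand <;> cases flag <;>
        by_cases hT : PySem.Chars.endswith e.toList sufT.toList = true <;>
        simp [pvScanRow, pvPassRow, hE, hT, ih]

theorem pvScan_eq (sufE sufT : String) (flag : Bool) :
    ∀ (ts : List (List String)) (cand : Option String),
      pvScan sufE sufT flag ts cand =
        match pvPass sufE ts with
        | some e => some e
        | none =>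
          match cand with
          | some c => some c
          | none => if flag then pvPass sufT ts else none := by
  intro ts
  induction ts with
  | nil => intro cand; cases cand <;> cases flag <;> simp [pvScan, pvPass]
  | cons row rest ih =>
    intro cand
    rw [pvScan, pvScanRow_eq]
    cases hE : pvPassRow sufE row with
    | some e => simp [pvPass, hE]
    | none =>
      cases cand <;> cases flag <;>
        cases hT : pvPassRow sufT row <;>
        simp [pvPass, hE, hT, ih]

-- ===== VERDICT (by name: the statement is the Claim_ definition above) =====
theorem get_full_uri_spec : Claim_equal_get_full_uri := by
  intro p ts _
  unfold Spec_get_full_uri get_full_uri get_full_uri_alt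
  rw [pvScan_eq]
  cases hE : pvPass ("/" ++ p) ts with
  | some e => simp
  | none =>
    simp only []
    by_cases h : encode_to_underscored_unicode p = p <;>
      simp [h, bne_iff_ne]
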